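-- pv_equiv track=rewrite | github.com/randy-cwy/AI-Driven-Recruitment | helper/skills_mapping.py | remove_duplicate_skills
-- ===== SOURCE A (Python) =====
-- def remove_duplicate_skills(jd_matched_skills):
--     """
--     Removes duplicate skills from the job description matched skills.
--     Keeps the entry with the highest proficiency level if duplicates exist.
--
--     Args:
--         jd_matched_skills (list): List of skills matched to the job description.
--
--     Returns:
--         list: List of unique skills for the job description.
--     """
--     unique_skills = {}
--
--     for skill in jd_matched_skills:
--         skill_name = skill["Skill"]
--
--         # If the skill is not already in unique_skills, add it
--         # If it is, replace it only if the new entry has a higher proficiency level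
--         if skill_name not in unique_skills:
--             unique_skills[skill_name] = skill
--         else:
--             # Check if the current skill has a higher proficiency level than the existing one
--             current_proficiency = skill.get("Proficiency Level", "N/A")
--             existing_proficiency = unique_skills[skill_name].get("Proficiency Level", "N/A")
--
--             # Define a simple proficiency hierarchy for comparison, if necessary
--             proficiency_order = {"Basic": 1, "Intermediate": 2, "Advanced": 3}
--             if proficiency_order.get(current_proficiency, 0) > proficiency_order.get(existing_proficiency, 0):
--                 unique_skills[skill_name] = skill
--
--     return list(unique_skills.values())
-- ===== SOURCE B (Python) =====
-- def remove_duplicate_skills(jd_matched_skills):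
--     proficiency_order = {"Basic": 1, "Intermediate": 2, "Advanced": 3}
--     groups = {}
--     for skill in jd_matched_skills:
--         groups.setdefault(skill["Skill"], []).append(skill)
--     return [max(group, key=lambda s: proficiency_order.get(s.get("Proficiency Level", "N/A"), 0))
--             for group in groups.values()]
-- ===== Notes on version B (the rewrite author's own statement) =====
-- stated objective: simpler
-- what changed: B replaces A's single-pass keep-the-better-entry dictionary update with two plain passes: group the entries by skill name into lists, then pick each group's winner with max(group, key=rank), whose first-maximum rule reproduces A's strict-> keep-earliest tie behaviour.
import Mathlib
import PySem

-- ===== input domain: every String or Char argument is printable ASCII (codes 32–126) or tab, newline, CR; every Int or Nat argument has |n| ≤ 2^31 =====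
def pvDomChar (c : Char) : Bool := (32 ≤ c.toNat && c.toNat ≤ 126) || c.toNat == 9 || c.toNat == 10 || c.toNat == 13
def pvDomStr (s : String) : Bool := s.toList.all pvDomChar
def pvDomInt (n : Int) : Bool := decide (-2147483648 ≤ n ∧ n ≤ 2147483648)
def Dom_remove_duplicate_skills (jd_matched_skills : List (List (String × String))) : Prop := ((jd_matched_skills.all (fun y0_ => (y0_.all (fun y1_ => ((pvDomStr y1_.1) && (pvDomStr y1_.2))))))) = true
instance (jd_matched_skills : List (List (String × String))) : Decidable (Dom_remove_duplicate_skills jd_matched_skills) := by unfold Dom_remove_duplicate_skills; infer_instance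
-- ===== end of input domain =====

-- B separates the work into two plain passes — group entries by skill name, then pick each
-- group's first proficiency-maximum with max(..., key=...) — instead of A's in-place
-- keep-the-better-entry dictionary update; same cost, simpler to read.


-- ===== PORT A =====
-- the proficiency_order dict literal both Pythons contain
def pvProfOrder : PySem.Dict String Int :=
  PySem.Dict.mk [("Basic", 1), ("Intermediate", 2), ("Advanced", 3)]

-- skill["Skill"]: Python raises KeyError when the key is missing; those inputs are outside
-- Pre_, so the default "" is never reached on admitted inputs
def pvName (skill : List (String × String)) : String :=
  (PySem.Dict.mk skill).getD "Skill" ""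

def remove_duplicate_skills (jd_matched_skills : List (List (String × String))) : List (List (String × String)) :=
  (jd_matched_skills.foldl
    (fun (unique_skills : PySem.Dict String (List (String × String))) skill =>
      let skill_name := pvName skill
      if !(unique_skills.contains skill_name) then
        unique_skills.insert skill_name skill
      else
        let current_proficiency := (PySem.Dict.mk skill).getD "Proficiency Level" "N/A"
        let existing_proficiency :=
          (PySem.Dict.mk (unique_skills.getD skill_name [])).getD "Proficiency Level" "N/A"
        if pvProfOrder.getD current_proficiency 0 > pvProfOrder.getD existing_proficiency 0 then
          unique_skills.insert skill_name skill
        else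
          unique_skills)
    PySem.Dict.empty).values

-- ===== PORT B =====
-- the key function of Source B's max(group, key=...)
def pvRank (s : List (String × String)) : Int :=
  pvProfOrder.getD ((PySem.Dict.mk s).getD "Proficiency Level" "N/A") 0

def remove_duplicate_skills_alt (jd_matched_skills : List (List (String × String))) : List (List (String × String)) :=
  let groups : PySem.Dict String (List (List (String × String))) :=
    jd_matched_skills.foldl
      (fun g skill => g.modify (pvName skill) [] (fun grp => grp ++ [skill]))
      PySem.Dict.empty
  -- max(group, key=...) returns the first maximal element; groups are nonempty, so getD [] never fires
  groups.values.map (fun group => (PySem.List.max? group pvRank).getD [])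

-- ===== PRECONDITION & SPEC =====
-- Pre_ excludes exactly the inputs containing a skill dict without a "Skill" key, on which
-- both Pythons raise KeyError.
def Pre_remove_duplicate_skills (jd_matched_skills : List (List (String × String))) : Prop :=
  jd_matched_skills.all (fun s => (PySem.Dict.mk s).contains "Skill") = true
instance (jd_matched_skills : List (List (String × String))) : Decidable (Pre_remove_duplicate_skills jd_matched_skills) := by unfold Pre_remove_duplicate_skills; infer_instance

def pvWitness_remove_duplicate_skills : (List (List (String × String))) :=
  [[("Skill", "Python"), ("Proficiency Level", "Basic")],
   [("Skill", "Python"), ("Proficiency Level", "Advanced")],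
   [("Skill", "SQL")]]

def Spec_remove_duplicate_skills (jd_matched_skills : List (List (String × String))) (out : List (List (String × String))) : Prop := out = remove_duplicate_skills_alt jd_matched_skills
instance (jd_matched_skills : List (List (String × String))) (out : List (List (String × String))) : Decidable (Spec_remove_duplicate_skills jd_matched_skills out) := by unfold Spec_remove_duplicate_skills; infer_instance

-- ===== CLAIM (what is proved, stated in full; the proofs are below) =====
def Claim_equal_remove_duplicate_skills : Prop := ∀ (jd_matched_skills : List (List (String × String))), Dom_remove_duplicate_skills jd_matched_skills → Pre_remove_duplicate_skills jd_matched_skills → Spec_remove_duplicate_skills jd_matched_skills (remove_duplicate_skills jd_matched_skills)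

-- ===== LEMMAS AND PROOFS =====

-- abbreviations for the two loop bodies (proof-side only)
def stepA (u : PySem.Dict String (List (String × String))) (skill : List (String × String)) :
    PySem.Dict String (List (String × String)) :=
  let skill_name := pvName skill
  if !(u.contains skill_name) then u.insert skill_name skill
  else
    if pvProfOrder.getD ((PySem.Dict.mk skill).getD "Proficiency Level" "N/A") 0 >
        pvProfOrder.getD ((PySem.Dict.mk (u.getD skill_name [])).getD "Proficiency Level" "N/A") 0 then
      u.insert skill_name skill
    else u

def stepB (g : PySem.Dict String (List (List (String × String)))) (skill : List (String × String)) :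
    PySem.Dict String (List (List (String × String))) :=
  g.modify (pvName skill) [] (fun grp => grp ++ [skill])

-- the fold that PySem.List.max? performs
def maxStep (acc : Option (List (String × String))) (x : List (String × String)) :
    Option (List (String × String)) :=
  match acc with
  | none => some x
  | some m => if pvRank m < pvRank x then some x else some m

theorem stepA_get? (u : PySem.Dict String (List (String × String))) (skill : List (String × String))
    (c : String) :
    (stepA u skill).get? c = if pvName skill = c then maxStep (u.get? c) skill else u.get? c := by
  by_cases hc : u.contains (pvName skill)
  · have hne : u.get? (pvName skill) ≠ none := by
      rw [Ne, PySem.Dict.get?_eq_none_iff_contains, hc]; simp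
    obtain ⟨x, hx⟩ := Option.ne_none_iff_exists'.mp hne
    have hgd : u.getD (pvName skill) [] = x := by simp [PySem.Dict.getD, hx]
    by_cases hcn : pvName skill = c
    · subst hcn
      simp only [stepA, maxStep, hc, hgd, hx, Bool.not_true, GT.gt, pvRank,        Bool.false_eq_true, if_false]
      split_ifs with h
      · simp [PySem.Dict.get?_insert_self]
      · exact hx
    · simp only [stepA, maxStep, hc, hgd, Bool.not_true, if_neg hcn, GT.gt, pvRank,
        Bool.false_eq_true, if_false]
      split_ifs with h
      · exact PySem.Dict.get?_insert_of_ne _ _ (fun hh => hcn hh.symm)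
      · rfl
  · have hn : u.get? (pvName skill) = none := (PySem.Dict.get?_eq_none_iff_contains _ _).mpr (by simpa using hc)
    by_cases hcn : pvName skill = c
    · subst hcn; simp [stepA, maxStep, hc, hn, PySem.Dict.get?_insert_self]
    · simp [stepA, hc, hcn, PySem.Dict.get?_insert_of_ne _ _ (fun h => hcn h.symm)]
theorem foldlA_get? (jd : List (List (String × String)))
    (u : PySem.Dict String (List (String × String))) (c : String) :
    (jd.foldl stepA u).get? c =
      (jd.filter (fun s => pvName s == c)).foldl maxStep (u.get? c) := by
  induction jd generalizing u with
  | nil => rfl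
  | cons skill rest ih =>
    rw [List.foldl_cons, ih]
    by_cases h : pvName skill = c
    · simp [h, stepA_get?]
    · simp [h, stepA_get?]

theorem foldlB_getD (jd : List (List (String × String)))
    (g : PySem.Dict String (List (List (String × String)))) (c : String) :
    (jd.foldl stepB g).getD c [] = g.getD c [] ++ jd.filter (fun s => pvName s == c) := by
  induction jd generalizing g with
  | nil => simp
  | cons skill rest ih =>
    rw [List.foldl_cons, ih]
    by_cases h : pvName skill = c
    · simp [h, stepB]
    · have h' : ¬ c = pvName skill := fun hh => h hh.symm
      simp [h, stepB, PySem.Dict.getD_modify, h']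

theorem keys_insert' {ν : Type} (d : PySem.Dict String ν) (k : String) (v : ν) :
    (d.insert k v).keys = if d.contains k then d.keys else d.keys ++ [k] := by
  by_cases hc : d.contains k
  · simp only [PySem.Dict.insert, hc, if_pos, PySem.Dict.keys, List.map_map]
    refine .trans (List.map_congr_left ?_) rfl
    intro p _
    by_cases hp : p.1 == k
    · simp [eq_of_beq hp]
    · simp only [beq_iff_eq] at hp; simp [hp]
  · simp [PySem.Dict.insert, hc, PySem.Dict.keys]
theorem contains_eq_keys {ν : Type} (d : PySem.Dict String ν) (k : String) :
    d.contains k = d.keys.any (· == k) := by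
  simp [PySem.Dict.contains, PySem.Dict.keys, List.any_map]; rfl

theorem stepA_keys (u : PySem.Dict String (List (String × String))) (skill : List (String × String)) :
    (stepA u skill).keys =
      if u.contains (pvName skill) then u.keys else u.keys ++ [pvName skill] := by
  by_cases hc : u.contains (pvName skill)
  · simp only [stepA, hc, Bool.not_true, Bool.false_eq_true, if_false, if_pos]
    split_ifs with h
    · rw [keys_insert', if_pos hc]
    · rfl
  · simp only [stepA, hc, Bool.not_false, if_true]
    rw [keys_insert', if_neg (by simp [hc])]
    simp

theorem stepB_keys (g : PySem.Dict String (List (List (String × String)))) (skill : List (String × String)) :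
    (stepB g skill).keys =
      if g.contains (pvName skill) then g.keys else g.keys ++ [pvName skill] := by
  rw [stepB, PySem.Dict.keys_modify, keys_insert']

theorem keys_AB (jd : List (List (String × String)))
    (u : PySem.Dict String (List (String × String)))
    (g : PySem.Dict String (List (List (String × String))))
    (h : u.keys = g.keys) :
    (jd.foldl stepA u).keys = (jd.foldl stepB g).keys := by
  induction jd generalizing u g with
  | nil => exact h
  | cons skill rest ih =>
    rw [List.foldl_cons, List.foldl_cons]
    apply ih
    rw [stepA_keys, stepB_keys, contains_eq_keys, contains_eq_keys, h]
theorem nodupA_keys (jd : List (List (String × String))) :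
    ((jd.foldl stepA PySem.Dict.empty).keys).Nodup := by
  rw [keys_AB jd PySem.Dict.empty PySem.Dict.empty rfl]
  exact PySem.Dict.nodup_keys_foldl_modify_key jd pvName [] (fun _ skill grp => grp ++ [skill])
    PySem.Dict.empty (by simp [PySem.Dict.empty, PySem.Dict.keys])

-- ===== VERDICT (by name: the statement is the Claim_ definition above) =====
theorem remove_duplicate_skills_spec : Claim_equal_remove_duplicate_skills := by
  intro jd _ _
  show remove_duplicate_skills jd = remove_duplicate_skills_alt jd
  have hkeys := keys_AB jd PySem.Dict.empty PySem.Dict.empty rfl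
  have nodA := nodupA_keys jd
  have nodB : ((jd.foldl stepB PySem.Dict.empty).keys).Nodup := hkeys ▸ nodA
  have hA : remove_duplicate_skills jd =
      ((jd.foldl stepA PySem.Dict.empty).keys).map
        (fun k => (jd.foldl stepA PySem.Dict.empty).getD k []) := by
    rw [show remove_duplicate_skills jd = (jd.foldl stepA PySem.Dict.empty).values from rfl,
        PySem.Dict.values_eq_map_keys _ nodA []]
  have hB : remove_duplicate_skills_alt jd =
      ((jd.foldl stepB PySem.Dict.empty).keys).map
        (fun k => (PySem.List.max? ((jd.foldl stepB PySem.Dict.empty).getD k []) pvRank).getD []) := by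
    rw [show remove_duplicate_skills_alt jd =
          ((jd.foldl stepB PySem.Dict.empty).values).map
            (fun g => (PySem.List.max? g pvRank).getD []) from rfl,
        PySem.Dict.values_eq_map_keys _ nodB [], List.map_map]
    rfl
  rw [hA, hB, ← hkeys]
  apply List.map_congr_left
  intro k _
  have h1 : (jd.foldl stepA PySem.Dict.empty).getD k [] =
      ((jd.filter (fun s => pvName s == k)).foldl maxStep none).getD [] := by
    rw [PySem.Dict.getD, foldlA_get?]
    rfl
  have h2 : (jd.foldl stepB PySem.Dict.empty).getD k [] = jd.filter (fun s => pvName s == k) := by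
    simpa using foldlB_getD jd PySem.Dict.empty k
  rw [h1, h2]
  rw [show ∀ (l : List (List (String × String))), PySem.List.max? l pvRank = l.foldl maxStep none
    from fun l => by rw [PySem.List.max?]; congr 1; funext acc x; cases acc <;> rfl]
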